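-- pv_equiv track=rewrite | github.com/NelsonAlmeida-18/LA2 | treino1/cruzamentos.py | cruzamentos
-- ===== SOURCE A (Python) =====
-- def cruzamentos(ruas):
--     myDict = {}
--     for rua in ruas:
--         if rua[0] not in myDict:
--             myDict[rua[0]]=0
--         if rua[-1] not in myDict:
--             myDict[rua[-1]]=0
--         if rua[0]==rua[-1]:
--             myDict[rua[0]]+=1
--             continue
--         if rua[0] in myDict:
--             myDict[rua[0]]+=1
--         if rua[-1] in myDict:
--             myDict[rua[-1]]+=1
--     newDict=sorted(myDict.items(),key=lambda item:item[0])
--     newDict=sorted(newDict, key=lambda item:item[1])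
--     return newDict
-- ===== SOURCE B (Python) =====
-- def cruzamentos(ruas):
--     # Flatten: one endpoint list (each street contributes its first char, and its
--     # last char only when different), then sort it and run-length-encode the runs;
--     # the runs are already in name order, so one stable sort by count finishes.
--     ends = []
--     for rua in ruas:
--         a, b = rua[0], rua[-1]
--         ends.append(a)
--         if b != a:
--             ends.append(b)
--     ends.sort()
--     runs = []
--     i = 0
--     n = len(ends)
--     while i < n:
--         j = i + 1
--         while j < n and ends[j] == ends[i]:
--             j += 1
--         runs.append((ends[i], j - i))
--         i = j
--     runs.sort(key=lambda item: item[1])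
--     return runs
-- ===== Notes on version B (the rewrite author's own statement) =====
-- stated objective: alternative
-- what changed: Replaces A's dictionary counting with four conditional branches by a flatten-sort-group pipeline: collect every street's (deduplicated) endpoints into one flat list, sort it, run-length-encode the runs (giving name-ordered (char,count) pairs), then one stable sort by count; no dict at all.
import Mathlib
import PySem

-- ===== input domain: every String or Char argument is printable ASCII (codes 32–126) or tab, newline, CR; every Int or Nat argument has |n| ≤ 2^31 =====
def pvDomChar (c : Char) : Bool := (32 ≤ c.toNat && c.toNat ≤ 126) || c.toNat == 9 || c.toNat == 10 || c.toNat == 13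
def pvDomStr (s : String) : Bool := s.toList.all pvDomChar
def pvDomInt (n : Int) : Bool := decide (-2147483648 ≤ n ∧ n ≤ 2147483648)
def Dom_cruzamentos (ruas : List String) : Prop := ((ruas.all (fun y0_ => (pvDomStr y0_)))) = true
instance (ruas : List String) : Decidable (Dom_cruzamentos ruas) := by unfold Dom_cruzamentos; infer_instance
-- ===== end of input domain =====

-- B replaces A's dict counting with four conditional branches by a flatten-sort-group pipeline:
-- one flat endpoint list, sorted, run-length encoded, then one stable sort by count
-- (objective: alternative; equivalence is about the return value, B sorts only its own local lists).

-- ===== PORT A =====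
-- the body of A's 'for rua in ruas' loop (where Python raises IndexError — rua = "" — the match
-- falls through and the dict is returned unchanged; such inputs are excluded by Pre_cruzamentos)
def cruzAStep (d : PySem.Dict String Int) (rua : String) : PySem.Dict String Int :=
  match PySem.List.pyGet? rua.toList 0, PySem.List.pyGet? rua.toList (-1) with
  | some c0, some c1 =>
      let a := String.ofList [c0]                                  -- rua[0]
      let b := String.ofList [c1]                                  -- rua[-1]
      let d := if d.contains a then d else d.insert a 0        -- if rua[0] not in myDict: myDict[rua[0]] = 0
      let d := if d.contains b then d else d.insert b 0        -- if rua[-1] not in myDict: myDict[rua[-1]] = 0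
      if a == b then d.modify a 0 (· + 1)                      -- myDict[rua[0]] += 1; continue
      else
        let d := if d.contains a then d.modify a 0 (· + 1) else d  -- if rua[0] in myDict: myDict[rua[0]] += 1
        if d.contains b then d.modify b 0 (· + 1) else d           -- if rua[-1] in myDict: myDict[rua[-1]] += 1
  | _, _ => d

def cruzamentos (ruas : List String) : List (String × Int) :=
  let myDict := ruas.foldl cruzAStep PySem.Dict.empty
  let newDict := PySem.List.sorted myDict.items (fun item => item.1) false
  let newDict := PySem.List.sorted newDict (fun item => item.2) false
  newDict

-- ===== PORT B =====
-- B's first loop: ends.append(rua[0]); if rua[-1] != rua[0]: ends.append(rua[-1])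
def cruzBEnds (ruas : List String) : List String :=
  ruas.foldl (fun acc rua =>
    match PySem.List.pyGet? rua.toList 0, PySem.List.pyGet? rua.toList (-1) with
    | some c0, some c1 =>
        let a := String.ofList [c0]
        let b := String.ofList [c1]
        let acc := acc ++ [a]
        if b ≠ a then acc ++ [b] else acc
    | _, _ => acc) []

-- B's while loop over the sorted ends: scan the run equal to ends[i]
-- (takeWhile = the inner scan j, dropWhile = where the outer loop resumes)
def cruzRuns : List String → List (String × Int)
  | [] => []
  | c :: rest =>
      (c, (1 + (rest.takeWhile (· == c)).length : Int)) :: cruzRuns (rest.dropWhile (· == c))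
  termination_by l => l.length
  decreasing_by
    simpa using Nat.lt_succ_of_le (List.length_dropWhile_le _ _)

def cruzamentos_alt (ruas : List String) : List (String × Int) :=
  let ends := PySem.List.sorted (cruzBEnds ruas) (fun x => x) false   -- ends.sort()
  let runs := cruzRuns ends
  PySem.List.sorted runs (fun item => item.2) false                   -- runs.sort(key=lambda item: item[1])

-- ===== PRECONDITION & SPEC =====
-- Pre_ excludes inputs containing an empty street: there rua[0] raises IndexError in both programs.
def Pre_cruzamentos (ruas : List String) : Prop := ∀ r ∈ ruas, r ≠ ""
instance (ruas : List String) : Decidable (Pre_cruzamentos ruas) := by unfold Pre_cruzamentos; infer_instance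
def pvWitness_cruzamentos : List String := ["ab", "bc", "aa"]

def Spec_cruzamentos (ruas : List String) (out : List (String × Int)) : Prop := out = cruzamentos_alt ruas
instance (ruas : List String) (out : List (String × Int)) : Decidable (Spec_cruzamentos ruas out) := by unfold Spec_cruzamentos; infer_instance

-- ===== CLAIM (what is proved, stated in full; the proofs are below) =====
def Claim_equal_cruzamentos : Prop := ∀ (ruas : List String), Dom_cruzamentos ruas → Pre_cruzamentos ruas → Spec_cruzamentos ruas (cruzamentos ruas)

-- ===== LEMMAS AND PROOFS =====

-- the endpoints one street contributes to B's flat list (first char; last char only when different)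
def endsOfRua (rua : String) : List String :=
  match PySem.List.pyGet? rua.toList 0, PySem.List.pyGet? rua.toList (-1) with
  | some c0, some c1 =>
      String.ofList [c0] :: (if String.ofList [c1] ≠ String.ofList [c0] then [String.ofList [c1]] else [])
  | _, _ => []

-- B's append loop flattens to flatMap
theorem cruzBEnds_eq_flatMap (ruas : List String) :
    cruzBEnds ruas = ruas.flatMap endsOfRua := by
  have hf : (fun (acc : List String) rua =>
      match PySem.List.pyGet? rua.toList 0, PySem.List.pyGet? rua.toList (-1) with
      | some c0, some c1 =>
          let a := String.ofList [c0]
          let b := String.ofList [c1]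
          let acc := acc ++ [a]
          if b ≠ a then acc ++ [b] else acc
      | _, _ => acc) = fun acc rua => acc ++ endsOfRua rua := by
    funext acc rua
    unfold endsOfRua
    cases PySem.List.pyGet? rua.toList 0 <;> cases PySem.List.pyGet? rua.toList (-1) <;> simp
    split_ifs <;> simp
  rw [cruzBEnds, hf, PySem.List.foldl_append_eq_flatMap]
  simp

-- two inserts at distinct keys commute up to a final overwrite (used to normalise A's branches)
theorem cruz_insert_comm (d : PySem.Dict String Int) (a b : String) (x v w : Int)
    (hab : a ≠ b) (hca : d.contains a = true) (hcb : d.contains b = false) :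
    ((d.insert b x).insert a v).insert b w = (d.insert a v).insert b w := by
  have hka : (d.insert b x).contains a = true := by
    simp [PySem.Dict.contains_insert, hca]
  have h1 : (d.insert b x).items = d.items ++ [(b, x)] :=
    PySem.Dict.items_insert_of_not_contains d x hcb
  have h2 : ((d.insert b x).insert a v).items
      = (d.items.map (fun p => if p.1 == a then (a, v) else p)) ++ [(b, x)] := by
    rw [PySem.Dict.items_insert_of_contains (d.insert b x) v hka, h1, List.map_append]
    simp [Ne.symm hab]
  have hbk : ∀ p ∈ d.items.map (fun p => if p.1 == a then (a, v) else p), p.1 ≠ b := by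
    intro p hp
    simp only [List.mem_map] at hp
    obtain ⟨q, hq, rfl⟩ := hp
    have hqb : q.1 ≠ b := by
      intro h
      have hmem : b ∈ d.keys := by
        simpa [PySem.Dict.keys, h] using List.mem_map_of_mem (f := (·.1)) hq
      have : d.contains b = true := (PySem.Dict.contains_iff_mem_keys _ _).mpr hmem
      simp [this] at hcb
    by_cases hqa : q.1 == a <;> simp [hqa, hab, hqb]
  have hc2 : ((d.insert b x).insert a v).contains b = true := by
    have hmem : (b, x) ∈ ((d.insert b x).insert a v).items := by
      rw [h2]; simp
    have := List.mem_map_of_mem (f := (·.1)) hmem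
    exact (PySem.Dict.contains_iff_mem_keys _ _).mpr (by simpa [PySem.Dict.keys] using this)
  have hc3 : (d.insert a v).contains b = false := by
    simp [PySem.Dict.contains_insert, Ne.symm hab, hcb]
  apply PySem.Dict.ext
  rw [PySem.Dict.items_insert_of_contains ((d.insert b x).insert a v) w hc2,
    PySem.Dict.items_insert_of_not_contains (d.insert a v) w hc3,
    PySem.Dict.items_insert_of_contains d v hca, h2, List.map_append]
  congr 1
  · have hid : ∀ p ∈ d.items.map (fun p => if p.1 == a then (a, v) else p),
        (fun p => if (p.1 == b) = true then (b, w) else p) p = id p := by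
      intro p hp
      simp [hbk p hp]
    exact (List.map_congr_left hid).trans (List.map_id _)
  · simp

-- A's branchy loop body is the counting fold over the street's deduplicated endpoints
theorem cruzAStep_eq_cnt (d : PySem.Dict String Int) (rua : String) :
    cruzAStep d rua = (endsOfRua rua).foldl (fun d c => d.insert c (d.getD c 0 + 1)) d := by
  unfold cruzAStep endsOfRua
  cases PySem.List.pyGet? rua.toList 0 <;> cases PySem.List.pyGet? rua.toList (-1) <;> try rfl
  rename_i c0 c1
  simp only []
  by_cases hab : String.ofList [c0] = String.ofList [c1]
  · rw [← hab]
    simp only [ne_eq, not_true_eq_false, ite_false]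
    by_cases hc : d.contains (String.ofList [c0]) <;>
      simp [hc, PySem.Dict.modify, PySem.Dict.getD_insert_self, PySem.Dict.insert_insert_self,
        PySem.Dict.getD_of_not_contains, PySem.Dict.contains_insert_self]
  · simp only [ne_eq, Ne.symm hab, not_false_eq_true, ite_true, List.foldl_cons, List.foldl_nil]
    by_cases hca : d.contains (String.ofList [c0]) <;> by_cases hcb : d.contains (String.ofList [c1]) <;>
      simp [hca, hcb, hab, Ne.symm hab, PySem.Dict.modify, PySem.Dict.contains_insert,
        PySem.Dict.getD_insert_of_ne, PySem.Dict.getD_insert_self, PySem.Dict.getD_of_not_contains,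
        PySem.Dict.insert_insert_self, PySem.Dict.contains_insert_self]
    · exact cruz_insert_comm d _ _ 0 _ 1 hab hca (by simpa using hcb)
    · rw [cruz_insert_comm (d.insert (String.ofList [c0]) 0) _ _ 0 1 1 hab
        (PySem.Dict.contains_insert_self _ _ _)
        (by simp [PySem.Dict.contains_insert, Ne.symm hab, hcb]),
        PySem.Dict.insert_insert_self]

-- A's dict after the whole loop: values count the flat endpoint list
theorem cruzA_getD (ruas : List String) (d : PySem.Dict String Int) (c : String) :
    (ruas.foldl cruzAStep d).getD c 0 = d.getD c 0 + ((ruas.flatMap endsOfRua).count c : Int) := by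
  induction ruas generalizing d with
  | nil => simp
  | cons r rs ih =>
    rw [List.foldl_cons, ih, cruzAStep_eq_cnt, PySem.Dict.getD_foldl_insert_add_one,
      List.flatMap_cons, List.count_append]
    push_cast
    ring

-- … its keys are exactly the endpoints seen
theorem cruzA_contains (ruas : List String) (d : PySem.Dict String Int) (c : String) :
    (ruas.foldl cruzAStep d).contains c = true ↔ c ∈ ruas.flatMap endsOfRua ∨ d.contains c = true := by
  induction ruas generalizing d with
  | nil => simp
  | cons r rs ih =>
    rw [List.foldl_cons, ih, List.flatMap_cons]
    have hstep : (cruzAStep d r).contains c = true ↔ c ∈ endsOfRua r ∨ d.contains c = true := by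
      rw [cruzAStep_eq_cnt, PySem.Dict.contains_iff_mem_keys, PySem.Dict.keys_foldl_insert,
        PySem.Set.mem_update, ← PySem.Dict.contains_iff_mem_keys]
      tauto
    rw [hstep, List.mem_append]
    tauto

-- … and they stay distinct
theorem cruzA_nodup (ruas : List String) (d : PySem.Dict String Int)
    (h : d.keys.Nodup) : (ruas.foldl cruzAStep d).keys.Nodup := by
  induction ruas generalizing d with
  | nil => exact h
  | cons r rs ih =>
    rw [List.foldl_cons]
    exact ih _ (by rw [cruzAStep_eq_cnt]; exact PySem.Dict.nodup_keys_foldl_insert _ _ _ h)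

-- items of a dict with distinct keys are its lookup graph
theorem cruz_mem_items_iff (d : PySem.Dict String Int) (h : d.keys.Nodup) (p : String × Int) :
    p ∈ d.items ↔ d.contains p.1 = true ∧ d.getD p.1 0 = p.2 := by
  have hiff := PySem.Dict.get?_eq_some_iff_mem_items d p.1 p.2 h
  constructor
  · intro hp
    have hg : d.get? p.1 = some p.2 := hiff.mpr (by simpa using hp)
    constructor
    · rw [PySem.Dict.contains_eq_isSome_get?, hg]; rfl
    · rw [PySem.Dict.getD_eq_get?_getD, hg]; rfl
  · rintro ⟨hc, hg⟩
    rw [PySem.Dict.contains_eq_isSome_get?] at hc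
    obtain ⟨w, hw⟩ := Option.isSome_iff_exists.mp hc
    have : w = p.2 := by rw [PySem.Dict.getD_eq_get?_getD, hw] at hg; simpa using hg
    subst this
    simpa using hiff.mp hw

-- in a (≤)-sorted list, everything surviving dropWhile (== c) is strictly above c
theorem cruz_dropWhile_gt (c : String) (rest : List String)
    (hle : ∀ x ∈ rest, c ≤ x) (hpw : rest.Pairwise (· ≤ ·)) :
    ∀ x ∈ rest.dropWhile (· == c), c < x := by
  intro x hx
  have hdr_pw : (rest.dropWhile (· == c)).Pairwise (· ≤ ·) :=
    hpw.sublist (List.dropWhile_sublist _)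
  have hxin : x ∈ rest := (List.dropWhile_sublist _).mem hx
  have hlex : c ≤ x := hle x hxin
  have hne : x ≠ c := by
    cases hdr : rest.dropWhile (· == c) with
    | nil => rw [hdr] at hx; cases hx
    | cons y ys =>
      rw [hdr] at hx
      have hy : ¬ (y == c) = true := by
        have := List.head_dropWhile_not (fun x => x == c) (l := rest) (by rw [hdr]; simp)
        simpa [hdr] using this
      have hyne : y ≠ c := by simpa using hy
      rcases List.mem_cons.mp hx with rfl | hx'
      · exact hyne
      · have hyle : y ≤ x := by
          rw [hdr] at hdr_pw
          exact (List.pairwise_cons.mp hdr_pw).1 x hx'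
        have hcy : c < y :=
          lt_of_le_of_ne (hle y ((List.dropWhile_sublist _).mem (by rw [hdr]; simp))) (Ne.symm hyne)
        exact fun hxc => absurd (lt_of_lt_of_le hcy hyle) (by simp [hxc])
  exact lt_of_le_of_ne hlex (Ne.symm hne)

-- run-length encoding of a (≤)-sorted list: membership characterisation
theorem mem_cruzRuns (l : List String) : l.Pairwise (· ≤ ·) →
    ∀ p : String × Int, (p ∈ cruzRuns l ↔ p.1 ∈ l ∧ p.2 = (l.count p.1 : Int)) := by
  induction l using cruzRuns.induct with
  | case1 => intro _ p; simp [cruzRuns]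
  | case2 c rest ih =>
    intro h p
    rw [List.pairwise_cons] at h
    have hsplit : rest.takeWhile (· == c) ++ rest.dropWhile (· == c) = rest :=
      List.takeWhile_append_dropWhile
    have ht : ∀ x ∈ rest.takeWhile (· == c), x = c := by
      intro x hx; simpa using List.mem_takeWhile_imp hx
    have hdr_pw : (rest.dropWhile (· == c)).Pairwise (· ≤ ·) :=
      h.2.sublist (List.dropWhile_sublist _)
    have hgt := cruz_dropWhile_gt c rest h.1 h.2
    have hrc : ∀ x, rest.count x
        = (rest.takeWhile (· == c)).count x + (rest.dropWhile (· == c)).count x := by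
      intro x
      conv_lhs => rw [← hsplit]
      rw [List.count_append]
    have hcnt_c : (c :: rest).count c = 1 + (rest.takeWhile (· == c)).length := by
      have h1 : (rest.takeWhile (· == c)).count c = (rest.takeWhile (· == c)).length :=
        List.count_eq_length.mpr (fun x hx => by simp [ht x hx])
      have h2 : (rest.dropWhile (· == c)).count c = 0 :=
        List.count_eq_zero.mpr (fun hc => absurd (hgt c hc) (lt_irrefl c))
      have h3 := hrc c
      simp only [List.count_cons_self]
      omega
    have hcnt_ne : ∀ x, x ≠ c → (c :: rest).count x = (rest.dropWhile (· == c)).count x := by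
      intro x hx
      have h1 : (rest.takeWhile (· == c)).count x = 0 :=
        List.count_eq_zero.mpr (fun hc => hx (ht x hc))
      have h3 := hrc x
      simp only [List.count_cons, beq_iff_eq, if_neg (Ne.symm hx)]
      omega
    rw [cruzRuns]
    constructor
    · intro hp
      rcases List.mem_cons.mp hp with rfl | hp'
      · exact ⟨List.mem_cons_self, by simp [hcnt_c]⟩
      · obtain ⟨h1, h2⟩ := (ih hdr_pw p).mp hp'
        have hne : p.1 ≠ c := fun hc => absurd (hgt p.1 h1) (by simp [hc])
        exact ⟨List.mem_cons_of_mem _ ((List.dropWhile_sublist _).mem h1),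
          by rw [h2, hcnt_ne p.1 hne]⟩
    · rintro ⟨h1, h2⟩
      by_cases hc : p.1 = c
      · have hp2 : p.2 = ((1 : Int) + ((rest.takeWhile (· == c)).length : Int)) := by
          rw [h2, hc, hcnt_c]; push_cast; ring
        have : p = (c, (1 + ((rest.takeWhile (· == c)).length : Int))) := Prod.ext hc hp2
        rw [this]
        exact List.mem_cons_self
      · apply List.mem_cons_of_mem
        apply (ih hdr_pw p).mpr
        refine ⟨?_, by rw [h2, hcnt_ne p.1 hc]⟩
        rcases List.mem_cons.mp h1 with h' | h'
        · exact absurd h' hc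
        · rw [← hsplit] at h'
          rcases List.mem_append.mp h' with h'' | h''
          · exact absurd (ht _ h'') hc
          · exact h''

-- run-length encoding of a (≤)-sorted list: names strictly increase
theorem pairwise_cruzRuns (l : List String) (h : l.Pairwise (· ≤ ·)) :
    (cruzRuns l).Pairwise (fun p q => p.1 < q.1) := by
  induction l using cruzRuns.induct with
  | case1 => simp [cruzRuns]
  | case2 c rest ih =>
    rw [List.pairwise_cons] at h
    have hdr_pw : (rest.dropWhile (· == c)).Pairwise (· ≤ ·) :=
      h.2.sublist (List.dropWhile_sublist _)
    rw [cruzRuns, List.pairwise_cons]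
    refine ⟨?_, ih hdr_pw⟩
    intro q hq
    have hmem := ((mem_cruzRuns _ hdr_pw q).mp hq).1
    exact cruz_dropWhile_gt c rest h.1 h.2 q.1 hmem

-- ===== VERDICT (by name: the statement is the Claim_ definition above) =====
theorem cruzamentos_spec : Claim_equal_cruzamentos := by
  intro ruas _ _
  unfold Spec_cruzamentos cruzamentos cruzamentos_alt
  simp only []
  -- the inner lists (A's name-sorted items, B's run-length encoding of the sorted ends) coincide
  have hends_pw : (PySem.List.sorted (cruzBEnds ruas) (fun x => x) false).Pairwise (· ≤ ·) :=
    PySem.List.sorted_pairwise _ _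
  have hperm_ends : (PySem.List.sorted (cruzBEnds ruas) (fun x => x) false).Perm
      (ruas.flatMap endsOfRua) :=
    (PySem.List.sorted_perm _ _ _).trans (by rw [cruzBEnds_eq_flatMap])
  have hnodA : (ruas.foldl cruzAStep PySem.Dict.empty).keys.Nodup :=
    cruzA_nodup ruas PySem.Dict.empty (by simp)
  have hrunsB := pairwise_cruzRuns _ hends_pw
  have hinner : PySem.List.sorted (ruas.foldl cruzAStep PySem.Dict.empty).items
      (fun item => item.1) false
      = cruzRuns (PySem.List.sorted (cruzBEnds ruas) (fun x => x) false) := by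
    apply PySem.List.sorted_eq_of_perm_of_pairwise_lt
    · -- both lists are Nodup with the same members
      have hnd1 : (cruzRuns (PySem.List.sorted (cruzBEnds ruas) (fun x => x) false)).Nodup :=
        hrunsB.imp (fun {p q} hpq hpq' => by rw [hpq'] at hpq; exact lt_irrefl _ hpq)
      have hnd2 : (ruas.foldl cruzAStep PySem.Dict.empty).items.Nodup :=
        List.Nodup.of_map (f := (·.1)) (by simpa [PySem.Dict.keys] using hnodA)
      rw [List.perm_ext_iff_of_nodup hnd1 hnd2]
      intro p
      rw [mem_cruzRuns _ hends_pw p, cruz_mem_items_iff _ hnodA p,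
        cruzA_contains, cruzA_getD]
      simp only [PySem.Dict.contains_empty, PySem.Dict.getD_empty, hperm_ends.mem_iff,
        hperm_ends.count_eq]
      constructor
      · rintro ⟨h1, h2⟩
        exact ⟨Or.inl h1, by omega⟩
      · rintro ⟨h1, h2⟩
        refine ⟨?_, by omega⟩
        rcases h1 with h1 | h1
        · exact h1
        · simp at h1
    · exact hrunsB
  rw [hinner]
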